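-- pv_equiv track=rewrite | github.com/yzkee/suna | backend/core/agents/runner/prompt_manager.py | _filter_disabled_tools
-- ===== SOURCE A (Python) =====
-- def _filter_disabled_tools(content: str, disabled_tools: list) -> str:
--     """Filter out lines mentioning disabled tools from content."""
--     if not disabled_tools:
--         return content
--     lines = content.split('\n')
--     filtered = []
--     for line in lines:
--         skip = False
--         for tool in disabled_tools:
--             if tool in line:
--                 skip = True
--                 break
--         if not skip:
--             filtered.append(line)
--     return '\n'.join(filtered)
-- ===== SOURCE B (Python) =====
-- def _filter_disabled_tools(content: str, disabled_tools: list) -> str: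
--     """Single pass over the characters: accumulate the current line and decide
--     keep/skip at each newline, instead of split -> filter -> join."""
--     if not disabled_tools:
--         return content
--     kept = []
--     line = []
--     for ch in content + '\n':
--         if ch == '\n':
--             s = ''.join(line)
--             if not any(tool in s for tool in disabled_tools):
--                 kept.append(s)
--             line = []
--         else:
--             line.append(ch)
--     return '\n'.join(kept)
-- ===== Notes on version B (the rewrite author's own statement) =====
-- stated objective: alternative
-- what changed: B streams over the characters once, accumulating the current line and deciding keep/skip at each newline boundary, instead of A's split-into-a-line-list, nested filter loop, then join pipeline.
import Mathlib
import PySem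

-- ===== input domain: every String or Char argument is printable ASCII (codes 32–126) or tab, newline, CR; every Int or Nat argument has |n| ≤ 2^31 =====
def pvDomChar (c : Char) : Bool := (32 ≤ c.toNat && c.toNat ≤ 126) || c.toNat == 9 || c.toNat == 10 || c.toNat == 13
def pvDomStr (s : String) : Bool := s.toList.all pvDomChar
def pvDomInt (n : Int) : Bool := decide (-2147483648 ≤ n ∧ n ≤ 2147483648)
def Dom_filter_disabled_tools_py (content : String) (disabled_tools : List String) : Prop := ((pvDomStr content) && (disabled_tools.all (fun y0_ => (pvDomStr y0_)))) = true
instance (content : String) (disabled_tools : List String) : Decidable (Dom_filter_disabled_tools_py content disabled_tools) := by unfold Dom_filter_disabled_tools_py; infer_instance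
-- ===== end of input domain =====

-- B streams over the characters once, deciding keep/skip at each newline, instead of A's split/filter/join pipeline (alternative decomposition, same cost).


-- ===== PORT A =====
def filter_disabled_tools_py (content : String) (disabled_tools : List String) : String :=
  if disabled_tools = [] then content
  else
    let lines := PySem.Chars.splitOn content.toList ['\n']
    let filtered := lines.foldl (fun filtered line =>
      let skip := disabled_tools.any (fun tool => PySem.Chars.isIn tool.toList line)
      if !skip then filtered ++ [line] else filtered) []
    String.ofList (PySem.Chars.join ['\n'] filtered)

-- ===== PORT B =====
-- one step of B's character loop: at '\n' decide to keep or drop the accumulated line, else extend it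
def stepB (disabled_tools : List String) (st : List (List Char) × List Char) (ch : Char) :
    List (List Char) × List Char :=
  if ch = '\n' then
    (if disabled_tools.any (fun tool => PySem.Chars.isIn tool.toList st.2) then st.1
     else st.1 ++ [st.2], [])
  else (st.1, st.2 ++ [ch])

def filter_disabled_tools_py_alt (content : String) (disabled_tools : List String) : String :=
  if disabled_tools = [] then content
  else
    let fin := (content.toList ++ ['\n']).foldl (stepB disabled_tools) ([], [])
    String.ofList (PySem.Chars.join ['\n'] fin.1)

-- ===== PRECONDITION & SPEC =====
def Spec_filter_disabled_tools_py (content : String) (disabled_tools : List String) (out : String) : Prop := out = filter_disabled_tools_py_alt content disabled_tools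
instance (content : String) (disabled_tools : List String) (out : String) : Decidable (Spec_filter_disabled_tools_py content disabled_tools out) := by unfold Spec_filter_disabled_tools_py; infer_instance

-- ===== CLAIM (what is proved, stated in full; the proofs are below) =====
def Claim_equal_filter_disabled_tools_py : Prop := ∀ (content : String) (disabled_tools : List String), Dom_filter_disabled_tools_py content disabled_tools → Spec_filter_disabled_tools_py content disabled_tools (filter_disabled_tools_py content disabled_tools)

-- ===== LEMMAS AND PROOFS =====

-- reference single-'\n' splitter both ports are compared against
def mySplit : List Char → List (List Char)
  | [] => [[]]
  | c :: cs => if c = '\n' then [] :: mySplit cs else (mySplit cs).modifyHead (c :: ·)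

-- line filter shared by both characterizations
def keepLines (dts : List String) (ls : List (List Char)) : List (List Char) :=
  ls.filter (fun l => !dts.any (fun tool => PySem.Chars.isIn tool.toList l))

theorem modifyHead_id' (l : List (List Char)) : List.modifyHead (fun x => x) l = l := by
  cases l <;> simp

theorem modifyHead_congr (f g : List Char → List Char) (h : ∀ x, f x = g x)
    (l : List (List Char)) : l.modifyHead f = l.modifyHead g := by
  cases l <;> simp [h]

theorem mySplit_nl (cs : List Char) : mySplit ('\n' :: cs) = [] :: mySplit cs := by
  rw [mySplit]
  simp

theorem mySplit_cons (c : Char) (cs : List Char) (hc : c ≠ '\n') :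
    mySplit (c :: cs) = (mySplit cs).modifyHead (c :: ·) := by
  rw [mySplit]
  simp [hc]

theorem go_eq (l : List Char) : ∀ (cur : List Char) (accs : List (List Char)) (f : Nat),
    l.length < f →
    PySem.Chars.splitOn.go ['\n'] f l cur accs
      = accs.reverse ++ (mySplit l).modifyHead (cur.reverse ++ ·) := by
  induction l with
  | nil =>
    intro cur accs f hf
    obtain ⟨f', rfl⟩ : ∃ f', f = f' + 1 := ⟨f - 1, by omega⟩
    rw [PySem.Chars.splitOn.go]
    simp [mySplit]
    omega
  | cons c cs ih =>
    intro cur accs f hf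
    obtain ⟨f', rfl⟩ : ∃ f', f = f' + 1 := ⟨f - 1, by omega⟩
    have hlt : cs.length < f' := by simpa using hf
    rw [PySem.Chars.splitOn.go]
    simp only [List.isPrefixOf, Bool.and_true, List.length_cons, List.drop_succ_cons]
    by_cases hc : c = '\n'
    · subst hc
      simp only [beq_self_eq_true, if_true, List.length_nil, List.drop_zero]
      rw [ih [] (cur.reverse :: accs) f' hlt, mySplit_nl]
      have h1 : List.modifyHead (fun x => List.reverse ([] : List Char) ++ x) (mySplit cs)
          = mySplit cs := by
        rw [modifyHead_congr _ (fun x => x) (by simp), modifyHead_id']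
      have h2 : List.modifyHead (fun x => cur.reverse ++ x) ([] :: mySplit cs)
          = cur.reverse :: mySplit cs := by simp
      rw [h1, h2]
      simp
    · have hbeq : ('\n' == c) = false := by rw [beq_eq_false_iff_ne]; exact fun h => hc h.symm
      rw [hbeq]
      rw [if_neg Bool.false_ne_true]
      rw [ih (c :: cur) accs f' hlt, mySplit_cons c cs hc]
      have hmm : List.modifyHead (fun x => cur.reverse ++ x)
            (List.modifyHead (fun x => c :: x) (mySplit cs))
          = List.modifyHead (fun x => (c :: cur).reverse ++ x) (mySplit cs) := by
        cases mySplit cs <;> simp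
      rw [hmm]

theorem splitOn_eq (cs : List Char) : PySem.Chars.splitOn cs ['\n'] = mySplit cs := by
  have h := go_eq cs [] [] (cs.length + 1) (by omega)
  rw [PySem.Chars.splitOn, h]
  rw [modifyHead_congr _ (fun x => x) (by simp), modifyHead_id']
  simp

theorem foldB_eq (dts : List String) (cs : List Char) : ∀ (accs : List (List Char)) (cur : List Char),
    ((cs ++ ['\n']).foldl (stepB dts) (accs, cur)).1
      = accs ++ keepLines dts ((mySplit cs).modifyHead (cur ++ ·)) := by
  induction cs with
  | nil =>
    intro accs cur
    by_cases h : dts.any (fun tool => PySem.Chars.isIn tool.toList cur)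
    · simp [stepB, keepLines, mySplit, h]
    · simp [stepB, keepLines, mySplit, h]
  | cons c cs ih =>
    intro accs cur
    by_cases hc : c = '\n'
    · subst hc
      by_cases h : dts.any (fun tool => PySem.Chars.isIn tool.toList cur)
      · simp only [List.cons_append, List.foldl_cons, stepB, if_true, h, ih]
        rw [mySplit_nl, modifyHead_congr _ (fun x => x) (by simp), modifyHead_id']
        have h2 : List.modifyHead (fun x => cur ++ x) ([] :: mySplit cs)
            = cur :: mySplit cs := by simp
        rw [h2]
        simp [keepLines, h]
      · simp only [List.cons_append, List.foldl_cons, stepB, if_true, h, ih]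
        rw [mySplit_nl, modifyHead_congr _ (fun x => x) (by simp), modifyHead_id']
        have h2 : List.modifyHead (fun x => cur ++ x) ([] :: mySplit cs)
            = cur :: mySplit cs := by simp
        rw [h2]
        simp [keepLines, h]
    · simp only [List.cons_append, List.foldl_cons, stepB, if_neg hc, ih]
      rw [mySplit_cons c cs hc]
      have hmm : List.modifyHead (fun x => cur ++ x)
            (List.modifyHead (fun x => c :: x) (mySplit cs))
          = List.modifyHead (fun x => cur ++ [c] ++ x) (mySplit cs) := by
        cases mySplit cs <;> simp
      rw [hmm]

theorem filterA_eq (dts : List String) (ls : List (List Char)) :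
    ls.foldl (fun filtered line =>
        let skip := dts.any (fun tool => PySem.Chars.isIn tool.toList line)
        if !skip then filtered ++ [line] else filtered) []
      = keepLines dts ls := by
  simpa [keepLines] using
    PySem.List.foldl_append_if_eq_filter
      (fun line => !dts.any (fun tool => PySem.Chars.isIn tool.toList line)) ls []

-- ===== VERDICT (by name: the statement is the Claim_ definition above) =====
theorem filter_disabled_tools_py_spec : Claim_equal_filter_disabled_tools_py := by
  intro content disabled_tools _
  unfold Spec_filter_disabled_tools_py filter_disabled_tools_py filter_disabled_tools_py_alt
  by_cases hd : disabled_tools = []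
  · simp [hd]
  · simp only [if_neg hd]
    rw [splitOn_eq, filterA_eq, foldB_eq]
    rw [modifyHead_congr _ (fun x => x) (by simp), modifyHead_id']
    simp
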